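-- pv_equiv track=rewrite | github.com/kiyoteruhosoda/FlaskApp | webapp/services/token_service.py | _normalize_scope
-- ===== SOURCE A (Python) =====
-- from typing import Iterable, Optional, Tuple, Any
--
-- def _normalize_scope(scope: Iterable[str] | None) -> tuple[list[str], str]:
--     if scope is None:
--         return [], ""
--
--     normalized = {item.strip() for item in scope if item and item.strip()}
--     if not normalized:
--         return [], ""
--
--     ordered = sorted(normalized)
--     return ordered, " ".join(ordered)
-- ===== SOURCE B (Python) =====
-- # B: sort-then-scan dedup — one sorted pass removing consecutive duplicates, no set.
-- def _normalize_scope(scope):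
--     if scope is None:
--         return [], ""
--     items = []
--     for item in scope:
--         s = item.strip()
--         if s:
--             items.append(s)
--     if not items:
--         return [], ""
--     items.sort()
--     result = [items[0]]
--     for s in items[1:]:
--         if s != result[-1]:
--             result.append(s)
--     return result, " ".join(result)
-- ===== Notes on version B (the rewrite author's own statement) =====
-- stated objective: alternative
-- what changed: Replaces the set-comprehension dedup with collecting stripped non-empty items (duplicates kept), sorting once, and removing consecutive duplicates in a single linear scan.
import Mathlib
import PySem

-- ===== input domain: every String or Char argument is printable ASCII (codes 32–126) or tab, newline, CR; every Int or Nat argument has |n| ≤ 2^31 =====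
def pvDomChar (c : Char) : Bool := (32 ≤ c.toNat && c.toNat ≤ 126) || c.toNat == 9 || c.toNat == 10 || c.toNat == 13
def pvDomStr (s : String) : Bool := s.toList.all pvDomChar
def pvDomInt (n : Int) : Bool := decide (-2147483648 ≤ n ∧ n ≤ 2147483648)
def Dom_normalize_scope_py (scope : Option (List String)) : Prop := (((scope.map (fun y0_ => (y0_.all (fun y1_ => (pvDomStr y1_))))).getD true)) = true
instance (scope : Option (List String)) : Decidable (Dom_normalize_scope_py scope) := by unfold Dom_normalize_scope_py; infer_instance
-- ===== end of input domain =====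

-- B replaces A's set-comprehension dedup by sort-then-consecutive-dedup in one linear scan (alternative algorithm, same cost).


-- ===== PORT A =====
def normalize_scope_py (scope : Option (List String)) : List String × String :=
  match scope with
  | none => ([], "")
  | some xs =>
    -- {item.strip() for item in scope if item and item.strip()}
    let normalized : PySem.Set String :=
      PySem.Set.ofList ((xs.filter
        (fun item => item ≠ "" && PySem.Str.strip item ≠ "")).map PySem.Str.strip)
    if normalized.isEmpty then ([], "")
    else
      let ordered := PySem.List.sorted normalized (fun x => x) false
      (ordered, PySem.Str.join " " ordered)

-- ===== PORT B =====
-- the collection loop: stripped items, empties dropped, duplicates KEPT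
def pvCollect : List String → List String
  | [] => []
  | item :: rest =>
    let s := PySem.Str.strip item
    if s ≠ "" then s :: pvCollect rest else pvCollect rest

-- the dedup scan: append each element only if it differs from the last appended one
def pvDedupAdj (last : String) : List String → List String
  | [] => []
  | s :: rest => if s ≠ last then s :: pvDedupAdj s rest else pvDedupAdj last rest

def normalize_scope_py_alt (scope : Option (List String)) : List String × String :=
  match scope with
  | none => ([], "")
  | some xs =>
    let items := pvCollect xs
    match PySem.List.sorted items (fun x => x) false with
    | [] => ([], "")
    | h :: t =>
      let result := h :: pvDedupAdj h t
      (result, PySem.Str.join " " result)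

-- ===== PRECONDITION & SPEC =====
def Spec_normalize_scope_py (scope : Option (List String)) (out : List String × String) : Prop := out = normalize_scope_py_alt scope
instance (scope : Option (List String)) (out : List String × String) : Decidable (Spec_normalize_scope_py scope out) := by unfold Spec_normalize_scope_py; infer_instance

-- ===== CLAIM (what is proved, stated in full; the proofs are below) =====
def Claim_equal_normalize_scope_py : Prop := ∀ (scope : Option (List String)), Dom_normalize_scope_py scope → Spec_normalize_scope_py scope (normalize_scope_py scope)

-- ===== LEMMAS AND PROOFS =====

-- A's filtered-mapped list is B's collected list.
theorem pvCollect_eq (xs : List String) :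
    (xs.filter (fun item => item ≠ "" && PySem.Str.strip item ≠ "")).map PySem.Str.strip
      = pvCollect xs := by
  induction xs with
  | nil => rfl
  | cons x rest ih =>
    by_cases hs : PySem.Str.strip x = ""
    · simpa [pvCollect, List.filter_cons, hs] using ih
    · have hx0 : x ≠ "" := by
        intro h; subst h; exact hs rfl
      simpa [pvCollect, List.filter_cons, hs, hx0] using ih

-- dedup of a sorted chain: strictly increasing and same members
theorem pvDedupAdj_spec (l : List String) :
    ∀ last, ((last :: l).Pairwise (· ≤ ·)) →
      ((last :: pvDedupAdj last l).Pairwise (· < ·)) ∧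
      (∀ a, a ∈ last :: pvDedupAdj last l ↔ a ∈ last :: l) := by
  induction l with
  | nil => intro last _; simp [pvDedupAdj]
  | cons s rest ih =>
    intro last h
    have hps := List.pairwise_cons.mp h
    have hls : last ≤ s := hps.1 s (by simp)
    have hrest : (s :: rest).Pairwise (· ≤ ·) := hps.2
    by_cases hne : s = last
    · subst hne
      have hr := ih s hrest
      have hred : pvDedupAdj s (s :: rest) = pvDedupAdj s rest := by
        simp only [pvDedupAdj]; rw [if_neg (fun h' : s ≠ s => h' rfl)]
      rw [hred]
      refine ⟨hr.1, fun a => ?_⟩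
      rw [hr.2 a]
      constructor
      · intro ha; rcases List.mem_cons.mp ha with h1 | h1 <;> simp [h1]
      · intro ha; rcases List.mem_cons.mp ha with h1 | h1
        · simp [h1]
        · exact h1
    · have hlt : last < s := lt_of_le_of_ne hls (fun e => hne e.symm)
      have hr := ih s hrest
      have hrest2 := List.pairwise_cons.mp hrest
      have hred : pvDedupAdj last (s :: rest) = s :: pvDedupAdj s rest := by
        simp only [pvDedupAdj]; rw [if_pos hne]
      rw [hred]
      constructor
      · apply List.pairwise_cons.mpr
        refine ⟨fun a ha => ?_, hr.1⟩
        have hmem : a ∈ s :: rest := (hr.2 a).mp ha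
        rcases List.mem_cons.mp hmem with h1 | h1
        · exact h1 ▸ hlt
        · exact lt_of_lt_of_le hlt (hrest2.1 a h1)
      · intro a
        constructor
        · intro ha
          rcases List.mem_cons.mp ha with h1 | h1
          · simp [h1]
          · have := (hr.2 a).mp h1
            rcases List.mem_cons.mp this with h2 | h2 <;> simp [h2]
        · intro ha
          rcases List.mem_cons.mp ha with h1 | h1
          · simp [h1]
          · exact List.mem_cons.mpr (Or.inr ((hr.2 a).mpr h1))

-- main list lemma: sorted(set(L)) = consecutive-dedup of sorted(L)
theorem sorted_set_eq_dedup (L t : List String) (hd : String)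
    (hs : PySem.List.sorted L (fun x => x) false = hd :: t) :
    PySem.List.sorted (PySem.Set.ofList L) (fun x => x) false = hd :: pvDedupAdj hd t := by
  have hpair : (hd :: t).Pairwise (· ≤ ·) := by
    have hp := PySem.List.sorted_pairwise (xs := L) (key := fun x : String => x)
    rw [hs] at hp
    simpa using hp
  have hspec := pvDedupAdj_spec t hd hpair
  have hys_nodup : (hd :: pvDedupAdj hd t).Nodup := hspec.1.imp (fun h => ne_of_lt h)
  have hperm : (hd :: pvDedupAdj hd t).Perm (PySem.Set.ofList L) := by
    apply (List.perm_ext_iff_of_nodup hys_nodup (PySem.Set.nodup_ofList L)).mpr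
    intro a
    rw [hspec.2 a]
    have h1 : a ∈ hd :: t ↔ a ∈ L := by
      rw [← hs]; exact PySem.List.mem_sorted L _ false a
    rw [h1]
    exact Iff.symm (PySem.Set.mem_ofList L a)
  exact PySem.List.sorted_eq_of_perm_of_pairwise_lt (PySem.Set.ofList L)
    (hd :: pvDedupAdj hd t) (fun x => x) hperm (by simpa using hspec.1)

-- ===== VERDICT (by name: the statement is the Claim_ definition above) =====
theorem normalize_scope_py_spec : Claim_equal_normalize_scope_py := by
  intro scope _
  unfold Spec_normalize_scope_py normalize_scope_py normalize_scope_py_alt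
  match scope with
  | none => rfl
  | some xs =>
    simp only
    rw [pvCollect_eq]
    set L := pvCollect xs with hL
    cases hsrt : PySem.List.sorted L (fun x => x) false with
    | nil =>
      have hLnil : L = [] := (PySem.List.sorted_eq_nil_iff L (fun x => x) false).mp hsrt
      simp [hLnil, PySem.Set.ofList]
    | cons hd t =>
      have hne : ¬ (PySem.Set.ofList L).isEmpty := by
        simp only [List.isEmpty_iff]
        intro hempty
        have hLne : L ≠ [] := by
          intro h; rw [h] at hsrt
          exact absurd hsrt (by simp [PySem.List.sorted])
        cases hLc : L with
        | nil => exact hLne hLc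
        | cons a as =>
          have hmem : a ∈ PySem.Set.ofList L :=
            (PySem.Set.mem_ofList L a).mpr (by simp [hLc])
          rw [hempty] at hmem; simp at hmem
      rw [if_neg (by simpa using hne)]
      rw [sorted_set_eq_dedup L t hd hsrt]
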